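-- pv_equiv track=rewrite | github.com/MozhiJiawei/Huawei_OJ | OJ_Python/OJ_Python_3.5/complete_num.py | count
-- ===== SOURCE A (Python) =====
-- def count(n):
--     if n < 0 or n > 500000:
--         return -1
--     complete_num = [6, 28, 496, 8128]
--     for i, item in enumerate(complete_num):
--         if item > n:
--             return i
--     return 4
-- ===== SOURCE B (Python) =====
-- def is_prime(m):
--     if m < 2:
--         return False
--     d = 2
--     while d * d <= m:
--         if m % d == 0:
--             return False
--         d += 1
--     return True
--
--
-- def count(n):
--     # Euclid-Euler: every even perfect number is 2**(p-1) * (2**p - 1) with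
--     # 2**p - 1 a Mersenne prime, and all perfect numbers <= 500000 are even.
--     # Candidates grow monotonically in p; p = 10 already exceeds 500000.
--     if n < 0 or n > 500000:
--         return -1
--     total = 0
--     for p in range(2, 20):
--         cand = 2 ** (p - 1) * (2 ** p - 1)
--         if cand > n:
--             return total
--         if is_prime(2 ** p - 1):
--             total += 1
--     return total
-- ===== Notes on version B (the rewrite author's own statement) =====
-- stated objective: alternative
-- what changed: Replaces A's scan of a hardcoded list of the four perfect numbers by the Euclid-Euler generation of even perfect numbers 2^(p-1)*(2^p-1), testing each Mersenne number 2^p-1 for primality by trial division and counting the candidates that are <= n (all perfect numbers <= 500000 are even, so the results coincide).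
import Mathlib
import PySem

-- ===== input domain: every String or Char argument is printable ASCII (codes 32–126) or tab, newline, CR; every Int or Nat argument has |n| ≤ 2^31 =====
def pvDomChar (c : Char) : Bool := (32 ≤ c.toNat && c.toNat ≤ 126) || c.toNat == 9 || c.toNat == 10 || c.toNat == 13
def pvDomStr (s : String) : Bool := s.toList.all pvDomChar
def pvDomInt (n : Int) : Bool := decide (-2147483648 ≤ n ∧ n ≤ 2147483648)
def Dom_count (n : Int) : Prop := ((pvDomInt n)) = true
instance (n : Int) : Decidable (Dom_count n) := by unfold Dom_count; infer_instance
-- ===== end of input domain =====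

-- B replaces A's scan of a hardcoded perfect-number list by the Euclid–Euler
-- generation of even perfect numbers 2^(p-1)(2^p-1) with Mersenne-prime test by trial division.

-- ===== PORT A =====
-- 'for i, item in enumerate(complete_num): if item > n: return i' / 'return 4'
def countLoop (n : Int) : List (Int × Int) → Int
  | [] => 4
  | (i, item) :: rest => if item > n then i else countLoop n rest

def count (n : Int) : Int :=
  if n < 0 ∨ n > 500000 then -1
  else
    let complete_num : List Int := [6, 28, 496, 8128]
    countLoop n (PySem.List.enumerate complete_num)

-- ===== PORT B =====
-- is_prime: 'while d * d <= m: if m % d == 0: return False; d += 1; return True'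
def isPrimeLoop (m d : Int) : Bool :=
  if _h : d * d ≤ m then
    if m % d == 0 then false else isPrimeLoop m (d + 1)
  else true
termination_by (m + 1 - d).toNat
decreasing_by
  have hdm : d ≤ m := by nlinarith [sq_nonneg d, sq_nonneg (d - 1)]
  omega

def isPrime (m : Int) : Bool :=
  if m < 2 then false else isPrimeLoop m 2

-- '2 ** k' for the nonnegative exponents of the loop, ported exactly as 2 ^ k.toNat
def pow2 (k : Int) : Int := 2 ^ k.toNat

-- the 'for p in range(2, 20)' loop with its early 'return total'
def countAltGo (n : Int) (total : Int) : List Int → Int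
  | [] => total
  | p :: rest =>
      let cand := pow2 (p - 1) * (pow2 p - 1)
      if cand > n then total
      else countAltGo n (if isPrime (pow2 p - 1) then total + 1 else total) rest

def count_alt (n : Int) : Int :=
  if n < 0 ∨ n > 500000 then -1
  else countAltGo n 0 (PySem.List.pyRange 2 20 1)

-- ===== PRECONDITION & SPEC =====
def Spec_count (n : Int) (out : Int) : Prop := out = count_alt n
instance (n : Int) (out : Int) : Decidable (Spec_count n out) := by unfold Spec_count; infer_instance

-- ===== CLAIM (what is proved, stated in full; the proofs are below) =====
def Claim_equal_count : Prop := ∀ (n : Int), Dom_count n → Spec_count n (count n)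

-- ===== LEMMAS AND PROOFS =====
theorem pyRange_2_20 : PySem.List.pyRange 2 20 1 =
    [2, 3, 4, 5, 6, 7, 8, 9, 10, 11, 12, 13, 14, 15, 16, 17, 18, 19] := by decide

theorem isPrime_3 : isPrime 3 = true := by
  rw [isPrime]; norm_num; repeat (rw [isPrimeLoop]; norm_num)
theorem isPrime_7 : isPrime 7 = true := by
  rw [isPrime]; norm_num; repeat (rw [isPrimeLoop]; norm_num)
theorem isPrime_15 : isPrime 15 = false := by
  rw [isPrime]; norm_num; repeat (rw [isPrimeLoop]; norm_num)
theorem isPrime_31 : isPrime 31 = true := by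
  rw [isPrime]; norm_num; repeat (rw [isPrimeLoop]; norm_num)
theorem isPrime_63 : isPrime 63 = false := by
  rw [isPrime]; norm_num; repeat (rw [isPrimeLoop]; norm_num)
theorem isPrime_127 : isPrime 127 = true := by
  rw [isPrime]; norm_num; repeat (rw [isPrimeLoop]; norm_num)
theorem isPrime_255 : isPrime 255 = false := by
  rw [isPrime]; norm_num; repeat (rw [isPrimeLoop]; norm_num)
theorem isPrime_511 : isPrime 511 = false := by
  rw [isPrime]; norm_num; repeat (rw [isPrimeLoop]; norm_num)


theorem pvCand_2 : pow2 1 * (3:Int) = (6:Int) := by decide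
theorem pvMers_2 : pow2 2 - 1 = (3:Int) := by decide
theorem pvCand_3 : pow2 2 * (7:Int) = (28:Int) := by decide
theorem pvMers_3 : pow2 3 - 1 = (7:Int) := by decide
theorem pvCand_4 : pow2 3 * (15:Int) = (120:Int) := by decide
theorem pvMers_4 : pow2 4 - 1 = (15:Int) := by decide
theorem pvCand_5 : pow2 4 * (31:Int) = (496:Int) := by decide
theorem pvMers_5 : pow2 5 - 1 = (31:Int) := by decide
theorem pvCand_6 : pow2 5 * (63:Int) = (2016:Int) := by decide
theorem pvMers_6 : pow2 6 - 1 = (63:Int) := by decide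
theorem pvCand_7 : pow2 6 * (127:Int) = (8128:Int) := by decide
theorem pvMers_7 : pow2 7 - 1 = (127:Int) := by decide
theorem pvCand_8 : pow2 7 * (255:Int) = (32640:Int) := by decide
theorem pvMers_8 : pow2 8 - 1 = (255:Int) := by decide
theorem pvCand_9 : pow2 8 * (511:Int) = (130816:Int) := by decide
theorem pvMers_9 : pow2 9 - 1 = (511:Int) := by decide
theorem pvCand_10 : pow2 9 * (1023:Int) = (523776:Int) := by decide
theorem pvMers_10 : pow2 10 - 1 = (1023:Int) := by decide

theorem countAltGo_eval (n : Int) (h0 : 0 ≤ n) (h1 : n ≤ 500000) :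
    countAltGo n 0 [2, 3, 4, 5, 6, 7, 8, 9, 10, 11, 12, 13, 14, 15, 16, 17, 18, 19] =
      if 6 > n then 0 else if 28 > n then 1 else if 496 > n then 2
      else if 8128 > n then 3 else 4 := by
  by_cases hb0 : n < 6
  · have hc2 : (6:Int) > n := by omega
    rw [countAltGo]
    norm_num [pvMers_2, pvCand_2, hc2]
    try (split_ifs <;> omega)
    try omega
  by_cases hb1 : n < 28
  · have hc2 : ¬ ((6:Int) > n) := by omega
    rw [countAltGo]
    norm_num [pvMers_2, pvCand_2, isPrime_3, hc2]
    have hc3 : (28:Int) > n := by omega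
    rw [countAltGo]
    norm_num [pvMers_3, pvCand_3, hc3]
    try (split_ifs <;> omega)
    try omega
  by_cases hb2 : n < 120
  · have hc2 : ¬ ((6:Int) > n) := by omega
    rw [countAltGo]
    norm_num [pvMers_2, pvCand_2, isPrime_3, hc2]
    have hc3 : ¬ ((28:Int) > n) := by omega
    rw [countAltGo]
    norm_num [pvMers_3, pvCand_3, isPrime_7, hc3]
    have hc4 : (120:Int) > n := by omega
    rw [countAltGo]
    norm_num [pvMers_4, pvCand_4, hc4]
    try (split_ifs <;> omega)
    try omega
  by_cases hb3 : n < 496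
  · have hc2 : ¬ ((6:Int) > n) := by omega
    rw [countAltGo]
    norm_num [pvMers_2, pvCand_2, isPrime_3, hc2]
    have hc3 : ¬ ((28:Int) > n) := by omega
    rw [countAltGo]
    norm_num [pvMers_3, pvCand_3, isPrime_7, hc3]
    have hc4 : ¬ ((120:Int) > n) := by omega
    rw [countAltGo]
    norm_num [pvMers_4, pvCand_4, isPrime_15, hc4]
    have hc5 : (496:Int) > n := by omega
    rw [countAltGo]
    norm_num [pvMers_5, pvCand_5, hc5]
    try (split_ifs <;> omega)
    try omega
  by_cases hb4 : n < 2016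
  · have hc2 : ¬ ((6:Int) > n) := by omega
    rw [countAltGo]
    norm_num [pvMers_2, pvCand_2, isPrime_3, hc2]
    have hc3 : ¬ ((28:Int) > n) := by omega
    rw [countAltGo]
    norm_num [pvMers_3, pvCand_3, isPrime_7, hc3]
    have hc4 : ¬ ((120:Int) > n) := by omega
    rw [countAltGo]
    norm_num [pvMers_4, pvCand_4, isPrime_15, hc4]
    have hc5 : ¬ ((496:Int) > n) := by omega
    rw [countAltGo]
    norm_num [pvMers_5, pvCand_5, isPrime_31, hc5]
    have hc6 : (2016:Int) > n := by omega
    rw [countAltGo]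
    norm_num [pvMers_6, pvCand_6, hc6]
    try (split_ifs <;> omega)
    try omega
  by_cases hb5 : n < 8128
  · have hc2 : ¬ ((6:Int) > n) := by omega
    rw [countAltGo]
    norm_num [pvMers_2, pvCand_2, isPrime_3, hc2]
    have hc3 : ¬ ((28:Int) > n) := by omega
    rw [countAltGo]
    norm_num [pvMers_3, pvCand_3, isPrime_7, hc3]
    have hc4 : ¬ ((120:Int) > n) := by omega
    rw [countAltGo]
    norm_num [pvMers_4, pvCand_4, isPrime_15, hc4]
    have hc5 : ¬ ((496:Int) > n) := by omega
    rw [countAltGo]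
    norm_num [pvMers_5, pvCand_5, isPrime_31, hc5]
    have hc6 : ¬ ((2016:Int) > n) := by omega
    rw [countAltGo]
    norm_num [pvMers_6, pvCand_6, isPrime_63, hc6]
    have hc7 : (8128:Int) > n := by omega
    rw [countAltGo]
    norm_num [pvMers_7, pvCand_7, hc7]
    try (split_ifs <;> omega)
    try omega
  by_cases hb6 : n < 32640
  · have hc2 : ¬ ((6:Int) > n) := by omega
    rw [countAltGo]
    norm_num [pvMers_2, pvCand_2, isPrime_3, hc2]
    have hc3 : ¬ ((28:Int) > n) := by omega
    rw [countAltGo]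
    norm_num [pvMers_3, pvCand_3, isPrime_7, hc3]
    have hc4 : ¬ ((120:Int) > n) := by omega
    rw [countAltGo]
    norm_num [pvMers_4, pvCand_4, isPrime_15, hc4]
    have hc5 : ¬ ((496:Int) > n) := by omega
    rw [countAltGo]
    norm_num [pvMers_5, pvCand_5, isPrime_31, hc5]
    have hc6 : ¬ ((2016:Int) > n) := by omega
    rw [countAltGo]
    norm_num [pvMers_6, pvCand_6, isPrime_63, hc6]
    have hc7 : ¬ ((8128:Int) > n) := by omega
    rw [countAltGo]
    norm_num [pvMers_7, pvCand_7, isPrime_127, hc7]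
    have hc8 : (32640:Int) > n := by omega
    rw [countAltGo]
    norm_num [pvMers_8, pvCand_8, hc8]
    try (split_ifs <;> omega)
    try omega
  by_cases hb7 : n < 130816
  · have hc2 : ¬ ((6:Int) > n) := by omega
    rw [countAltGo]
    norm_num [pvMers_2, pvCand_2, isPrime_3, hc2]
    have hc3 : ¬ ((28:Int) > n) := by omega
    rw [countAltGo]
    norm_num [pvMers_3, pvCand_3, isPrime_7, hc3]
    have hc4 : ¬ ((120:Int) > n) := by omega
    rw [countAltGo]
    norm_num [pvMers_4, pvCand_4, isPrime_15, hc4]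
    have hc5 : ¬ ((496:Int) > n) := by omega
    rw [countAltGo]
    norm_num [pvMers_5, pvCand_5, isPrime_31, hc5]
    have hc6 : ¬ ((2016:Int) > n) := by omega
    rw [countAltGo]
    norm_num [pvMers_6, pvCand_6, isPrime_63, hc6]
    have hc7 : ¬ ((8128:Int) > n) := by omega
    rw [countAltGo]
    norm_num [pvMers_7, pvCand_7, isPrime_127, hc7]
    have hc8 : ¬ ((32640:Int) > n) := by omega
    rw [countAltGo]
    norm_num [pvMers_8, pvCand_8, isPrime_255, hc8]
    have hc9 : (130816:Int) > n := by omega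
    rw [countAltGo]
    norm_num [pvMers_9, pvCand_9, hc9]
    try (split_ifs <;> omega)
    try omega
  · have hc2 : ¬ ((6:Int) > n) := by omega
    rw [countAltGo]
    norm_num [pvMers_2, pvCand_2, isPrime_3, hc2]
    have hc3 : ¬ ((28:Int) > n) := by omega
    rw [countAltGo]
    norm_num [pvMers_3, pvCand_3, isPrime_7, hc3]
    have hc4 : ¬ ((120:Int) > n) := by omega
    rw [countAltGo]
    norm_num [pvMers_4, pvCand_4, isPrime_15, hc4]
    have hc5 : ¬ ((496:Int) > n) := by omega
    rw [countAltGo]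
    norm_num [pvMers_5, pvCand_5, isPrime_31, hc5]
    have hc6 : ¬ ((2016:Int) > n) := by omega
    rw [countAltGo]
    norm_num [pvMers_6, pvCand_6, isPrime_63, hc6]
    have hc7 : ¬ ((8128:Int) > n) := by omega
    rw [countAltGo]
    norm_num [pvMers_7, pvCand_7, isPrime_127, hc7]
    have hc8 : ¬ ((32640:Int) > n) := by omega
    rw [countAltGo]
    norm_num [pvMers_8, pvCand_8, isPrime_255, hc8]
    have hc9 : ¬ ((130816:Int) > n) := by omega
    rw [countAltGo]
    norm_num [pvMers_9, pvCand_9, isPrime_511, hc9]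
    have hc10 : (523776:Int) > n := by omega
    rw [countAltGo]
    norm_num [pvMers_10, pvCand_10, hc10]
    try (split_ifs <;> omega)
    try omega

-- ===== VERDICT (by name: the statement is the Claim_ definition above) =====
theorem count_spec : Claim_equal_count := by
  intro n _
  unfold Spec_count count count_alt
  by_cases h : n < 0 ∨ n > 500000
  · simp [h]
  · have h0 : 0 ≤ n := by omega
    have h1 : n ≤ 500000 := by omega
    simp only [h, if_false, pyRange_2_20, countAltGo_eval n h0 h1,
      PySem.List.enumerate, countLoop]
    norm_num
    try (split_ifs <;> omega)
    try omega
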